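-- pv_equiv track=rewrite | github.com/FlameDanita/VK-edu.-Algorithms-and-data-structures | Module 1/Task 6.py | booble_sort
-- ===== SOURCE A (Python) =====
-- def booble_sort(nums):
--     odd_arr, not_odd_arr = [], []
--     for i in range(len(nums)):
--         if nums[i] % 2 == 0:
--             odd_arr.append(nums[i])
--         else:
--             not_odd_arr.append(nums[i])
--
--     nums = sorted(odd_arr)
--     nums.extend(sorted(not_odd_arr))
--
--     return(nums)
-- ===== SOURCE B (Python) =====
-- def booble_sort(nums):
--     return sorted(nums, key=lambda x: (x % 2, x))
-- ===== Notes on version B (the rewrite author's own statement) =====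
-- stated objective: idiomatic
-- what changed: Replaces the explicit parity-partition loop and two separate sorts with a single stable sort keyed by (x % 2, x), which puts evens (in order) before odds (in order).
import Mathlib
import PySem

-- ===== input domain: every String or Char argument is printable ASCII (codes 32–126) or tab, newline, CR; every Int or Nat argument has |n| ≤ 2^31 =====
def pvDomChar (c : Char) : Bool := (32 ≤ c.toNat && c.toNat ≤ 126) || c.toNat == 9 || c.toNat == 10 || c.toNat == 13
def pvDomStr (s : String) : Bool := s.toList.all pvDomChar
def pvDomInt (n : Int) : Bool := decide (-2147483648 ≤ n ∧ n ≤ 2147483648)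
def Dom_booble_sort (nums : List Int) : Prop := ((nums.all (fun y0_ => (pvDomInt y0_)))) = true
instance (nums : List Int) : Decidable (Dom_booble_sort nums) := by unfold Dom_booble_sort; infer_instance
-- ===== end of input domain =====

-- B replaces A's explicit parity-partition loop and two separate sorts by one stable sort
-- keyed on (x % 2, x); equivalence of the return values is proved for all inputs.

-- ===== PORT A =====
def booble_sort (nums : List Int) : List Int :=
  let p := (PySem.List.pyRange 0 (PySem.List.len nums) 1).foldl
      (fun (acc : List Int × List Int) i =>
        let x := PySem.List.pyGetD nums i 0
        if PySem.Int.mod x 2 = 0 then (acc.1 ++ [x], acc.2) else (acc.1, acc.2 ++ [x]))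
      ([], [])
  PySem.List.sorted p.1 (fun x => x) ++ PySem.List.sorted p.2 (fun x => x)

-- ===== PORT B =====
def booble_sort_alt (nums : List Int) : List Int :=
  PySem.List.sorted2 nums (fun x => PySem.Int.mod x 2) (fun x => x)

-- ===== PRECONDITION & SPEC =====
def Spec_booble_sort (nums : List Int) (out : List Int) : Prop := out = booble_sort_alt nums
instance (nums : List Int) (out : List Int) : Decidable (Spec_booble_sort nums out) := by unfold Spec_booble_sort; infer_instance

-- ===== CLAIM (what is proved, stated in full; the proofs are below) =====
def Claim_equal_booble_sort : Prop := ∀ (nums : List Int), Dom_booble_sort nums → Spec_booble_sort nums (booble_sort nums)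

-- ===== LEMMAS AND PROOFS =====

lemma pvMod2 (a : Int) : PySem.Int.mod a 2 = a % 2 :=
  PySem.Int.mod_eq_emod_of_pos (by omega)

-- the lexicographic order on (x % 2, x) that B's composite key induces
def pvR (a b : Int) : Prop :=
  a % 2 < b % 2 ∨ (a % 2 = b % 2 ∧ a ≤ b)

-- the boolean comparison sorted2 uses (reverse = false)
def pvBefore (a b : Int) : Bool :=
  decide (PySem.Int.mod a 2 < PySem.Int.mod b 2) ||
    (!decide (PySem.Int.mod b 2 < PySem.Int.mod a 2) && decide (a < b))

lemma pvR_of_before {a b : Int} (h : pvBefore a b = true) : pvR a b := by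
  simp only [pvBefore, pvMod2, Bool.or_eq_true, Bool.and_eq_true, Bool.not_eq_true',
    decide_eq_true_eq, decide_eq_false_iff_not] at h
  unfold pvR; omega

lemma pvR_of_not_before {a b : Int} (h : pvBefore a b = false) : pvR b a := by
  simp only [pvBefore, pvMod2, Bool.or_eq_false_iff, Bool.and_eq_false_iff, Bool.not_eq_false',
    decide_eq_true_eq, decide_eq_false_iff_not] at h
  unfold pvR; omega

lemma pvR_trans {a b c : Int} (h1 : pvR a b) (h2 : pvR b c) : pvR a c := by
  unfold pvR at *; omega

lemma pvR_antisymm {a b : Int} (h1 : pvR a b) (h2 : pvR b a) : a = b := by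
  unfold pvR at *; omega

lemma pv_insertBy_pairwise (x : Int) (acc : List Int)
    (h : acc.Pairwise pvR) : (PySem.List.insertBy pvBefore x acc).Pairwise pvR := by
  induction acc with
  | nil => simp [PySem.List.insertBy]
  | cons y ys ih =>
      rw [List.pairwise_cons] at h
      by_cases hb : pvBefore x y = true
      · simp only [PySem.List.insertBy, hb, if_pos]
        refine List.pairwise_cons.2 ⟨?_, List.pairwise_cons.2 ⟨h.1, h.2⟩⟩
        intro z hz
        rcases List.mem_cons.1 hz with hz | hz
        · subst hz; exact pvR_of_before hb
        · exact pvR_trans (pvR_of_before hb) (h.1 z hz)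
      · have hb' : pvBefore x y = false := by simpa using hb
        simp only [PySem.List.insertBy, hb', Bool.false_eq_true, if_false]
        refine List.pairwise_cons.2 ⟨?_, ih h.2⟩
        intro z hz
        rcases (PySem.List.mem_insertBy pvBefore x z ys).1 hz with hz | hz
        · subst hz; exact pvR_of_not_before hb'
        · exact h.1 z hz

lemma pv_foldl_insertBy_pairwise (xs acc : List Int)
    (h : acc.Pairwise pvR) :
    (xs.foldl (fun acc x => PySem.List.insertBy pvBefore x acc) acc).Pairwise pvR := by
  induction xs generalizing acc with
  | nil => simpa using h
  | cons x xs ih => exact ih _ (pv_insertBy_pairwise x acc h)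

lemma pv_alt_eq_foldl (nums : List Int) :
    booble_sort_alt nums
      = nums.foldl (fun acc x => PySem.List.insertBy pvBefore x acc) [] := rfl

lemma pv_alt_pairwise (nums : List Int) : (booble_sort_alt nums).Pairwise pvR := by
  rw [pv_alt_eq_foldl]
  exact pv_foldl_insertBy_pairwise nums [] (by simp)

lemma pv_partition_eq (nums : List Int) (a b : List Int) :
    nums.foldl
      (fun (acc : List Int × List Int) x =>
        if PySem.Int.mod x 2 = 0 then (acc.1 ++ [x], acc.2) else (acc.1, acc.2 ++ [x]))
      (a, b)
    = (a ++ nums.filter (fun x => decide (PySem.Int.mod x 2 = 0)),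
       b ++ nums.filter (fun x => !decide (PySem.Int.mod x 2 = 0))) := by
  induction nums generalizing a b with
  | nil => simp
  | cons x xs ih =>
      rw [List.foldl_cons, List.filter_cons, List.filter_cons]
      by_cases hx : PySem.Int.mod x 2 = 0
      · have hd : decide (PySem.Int.mod x 2 = 0) = true := decide_eq_true hx
        rw [if_pos hx, ih, hd]
        simp
      · have hd : decide (PySem.Int.mod x 2 = 0) = false := decide_eq_false hx
        rw [if_neg hx, ih, hd]
        simp

lemma pv_booble_sort_eq (nums : List Int) :
    booble_sort nums
      = PySem.List.sorted (nums.filter (fun x => decide (PySem.Int.mod x 2 = 0))) (fun x => x)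
        ++ PySem.List.sorted (nums.filter (fun x => !decide (PySem.Int.mod x 2 = 0))) (fun x => x) := by
  unfold booble_sort
  rw [PySem.List.foldl_pyRange_zero_pyGetD nums 0
      (fun (acc : List Int × List Int) x =>
        if PySem.Int.mod x 2 = 0 then (acc.1 ++ [x], acc.2) else (acc.1, acc.2 ++ [x])) ([], [])]
  rw [pv_partition_eq nums [] []]
  rfl

lemma pv_mod_two_of_mem_filter_even {x : Int}
    {nums : List Int} (h : x ∈ nums.filter (fun x => decide (PySem.Int.mod x 2 = 0))) :
    x % 2 = 0 := by
  have h1 := List.of_mem_filter h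
  rw [decide_eq_true_eq, pvMod2] at h1
  exact h1

lemma pv_mod_two_of_mem_filter_odd {x : Int}
    {nums : List Int} (h : x ∈ nums.filter (fun x => !decide (PySem.Int.mod x 2 = 0))) :
    x % 2 = 1 := by
  have h1 := List.of_mem_filter h
  rw [Bool.not_eq_eq_eq_not, Bool.not_true, decide_eq_false_iff_not, pvMod2] at h1
  omega

lemma pv_a_pairwise (nums : List Int) : (booble_sort nums).Pairwise pvR := by
  rw [pv_booble_sort_eq]
  rw [List.pairwise_append]
  refine ⟨?_, ?_, ?_⟩
  · refine List.Pairwise.imp_of_mem ?_ (PySem.List.sorted_pairwise _ (fun x => x))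
    intro a b ha hb hle
    have ha' := pv_mod_two_of_mem_filter_even ((PySem.List.mem_sorted _ _ _ _).1 ha)
    have hb' := pv_mod_two_of_mem_filter_even ((PySem.List.mem_sorted _ _ _ _).1 hb)
    exact Or.inr ⟨by omega, hle⟩
  · refine List.Pairwise.imp_of_mem ?_ (PySem.List.sorted_pairwise _ (fun x => x))
    intro a b ha hb hle
    have ha' := pv_mod_two_of_mem_filter_odd ((PySem.List.mem_sorted _ _ _ _).1 ha)
    have hb' := pv_mod_two_of_mem_filter_odd ((PySem.List.mem_sorted _ _ _ _).1 hb)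
    exact Or.inr ⟨by omega, hle⟩
  · intro a ha b hb
    have ha' := pv_mod_two_of_mem_filter_even ((PySem.List.mem_sorted _ _ _ _).1 ha)
    have hb' := pv_mod_two_of_mem_filter_odd ((PySem.List.mem_sorted _ _ _ _).1 hb)
    exact Or.inl (by omega)

lemma pv_a_perm (nums : List Int) : (booble_sort nums).Perm nums := by
  rw [pv_booble_sort_eq]
  exact ((PySem.List.sorted_perm _ _ _).append (PySem.List.sorted_perm _ _ _)).trans
    (List.filter_append_perm _ nums)

-- ===== VERDICT (by name: the statement is the Claim_ definition above) =====
theorem booble_sort_spec : Claim_equal_booble_sort := by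
  intro nums _
  unfold Spec_booble_sort
  refine (pv_a_perm nums).trans (PySem.List.sorted2_perm nums _ _ _).symm
    |>.eq_of_pairwise (fun a b _ _ h1 h2 => pvR_antisymm h1 h2)
    (pv_a_pairwise nums) (pv_alt_pairwise nums)
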